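-- pv_equiv track=rewrite | github.com/ldh-Hoon/Coding_Test | 프로그래머스/3/152995. 인사고과/인사고과.py | solution
-- ===== SOURCE A (Python) =====
-- def solution(scores):
--     ta = scores[0][0]
--     tb = scores[0][1]
--     scores.sort(key=lambda x: (-x[0], x[1]))
--
--     maxb = -1
--     count = 0
--     for a, b in scores:
--         if a > ta and b > tb:
--             return -1
--         if maxb <= b:
--             maxb = b
--             if a+b > ta + tb:
--                 count += 1
--     return count + 1
-- ===== SOURCE B (Python) =====
-- def solution(scores):
--     # Same observable in-place sort as the original; per-index recomputation
--     # replaces the running-accumulator loop. -1 seeds the max exactly as the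
--     # original's running max is seeded.
--     ta, tb = scores[0]
--     scores.sort(key=lambda x: (-x[0], x[1]))
--     if any(a > ta and b > tb for a, b in scores):
--         return -1
--     return 1 + sum(
--         1
--         for i, (a, b) in enumerate(scores)
--         if a + b > ta + tb and b >= max([-1] + [r[1] for r in scores[:i]])
--     )
-- ===== Notes on version B (the rewrite author's own statement) =====
-- stated objective: alternative
-- what changed: B replaces A's single-pass running-maximum accumulator with its mid-loop early return by a global any() dominance test followed by a per-index recomputation of the prefix maximum over a slice, counted with a sum-comprehension (same in-place sort, so the observable mutation matches).
import Mathlib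
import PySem

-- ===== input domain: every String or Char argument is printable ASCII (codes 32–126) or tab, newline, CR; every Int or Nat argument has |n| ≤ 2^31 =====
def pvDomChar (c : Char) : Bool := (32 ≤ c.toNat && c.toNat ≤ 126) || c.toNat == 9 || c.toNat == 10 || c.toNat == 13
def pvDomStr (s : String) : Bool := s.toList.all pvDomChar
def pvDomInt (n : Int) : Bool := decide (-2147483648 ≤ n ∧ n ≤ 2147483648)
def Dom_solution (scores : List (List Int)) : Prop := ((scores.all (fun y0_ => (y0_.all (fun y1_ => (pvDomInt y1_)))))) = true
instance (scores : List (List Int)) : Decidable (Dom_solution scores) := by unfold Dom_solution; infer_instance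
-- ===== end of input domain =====

-- B trades A's running-max accumulator loop for a global dominance test plus a
-- per-index prefix-max recomputation; both sort the argument in place in Python
-- (the equivalence proved here is about the return value; the mutation is identical).

-- ===== PORT A =====
-- the 'for a, b in scores' loop of A, state (maxb, count)
def solLoopA (ta tb : Int) : List (List Int) → Int → Int → Int
  | [], _, count => count + 1
  | r :: rest, maxb, count =>
    let a := PySem.List.pyGetD r 0 0
    let b := PySem.List.pyGetD r 1 0
    if a > ta ∧ b > tb then -1
    else if maxb ≤ b then
      solLoopA ta tb rest b (if a + b > ta + tb then count + 1 else count)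
    else
      solLoopA ta tb rest maxb count

def solution (scores : List (List Int)) : Int :=
  let ta := PySem.List.pyGetD (PySem.List.pyGetD scores 0 []) 0 0
  let tb := PySem.List.pyGetD (PySem.List.pyGetD scores 0 []) 1 0
  let s := PySem.List.sorted2 scores (fun x => -(PySem.List.pyGetD x 0 0)) (fun x => PySem.List.pyGetD x 1 0)
  solLoopA ta tb s (-1) 0

-- ===== PORT B =====
def solution_alt (scores : List (List Int)) : Int :=
  let ta := PySem.List.pyGetD (PySem.List.pyGetD scores 0 []) 0 0
  let tb := PySem.List.pyGetD (PySem.List.pyGetD scores 0 []) 1 0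
  let s := PySem.List.sorted2 scores (fun x => -(PySem.List.pyGetD x 0 0)) (fun x => PySem.List.pyGetD x 1 0)
  if s.any (fun r => decide (PySem.List.pyGetD r 0 0 > ta) && decide (PySem.List.pyGetD r 1 0 > tb)) then
    -1
  else
    1 + (PySem.List.enumerate s).foldl (fun acc p =>
        let a := PySem.List.pyGetD p.2 0 0
        let b := PySem.List.pyGetD p.2 1 0
        if a + b > ta + tb ∧
            PySem.List.maxD ((-1) :: (PySem.List.slice s none (some p.1)).map
              (fun r => PySem.List.pyGetD r 1 0)) (fun x => x) 0 ≤ b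
        then acc + 1 else acc) 0

-- ===== PRECONDITION & SPEC =====
-- Pre_ excludes exactly the inputs where the Python raises: an empty list (scores[0] → IndexError)
-- or a row whose length is not 2 (tuple unpacking in the for loop → ValueError / key IndexError).
def Pre_solution (scores : List (List Int)) : Prop :=
  scores ≠ [] ∧ ∀ r ∈ scores, r.length = 2
instance (scores : List (List Int)) : Decidable (Pre_solution scores) := by unfold Pre_solution; infer_instance

def pvWitness_solution : List (List Int) := [[2, 2], [1, 4], [3, 2], [3, 2], [2, 1]]

def Spec_solution (scores : List (List Int)) (out : Int) : Prop := out = solution_alt scores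
instance (scores : List (List Int)) (out : Int) : Decidable (Spec_solution scores out) := by unfold Spec_solution; infer_instance

-- ===== CLAIM (what is proved, stated in full; the proofs are below) =====
def Claim_equal_solution : Prop := ∀ (scores : List (List Int)), Dom_solution scores → Pre_solution scores → Spec_solution scores (solution scores)

-- ===== LEMMAS AND PROOFS =====

-- count of A's loop, with the running max written as 'max' on both branches
def cntSpec (ta tb : Int) : List (List Int) → Int → Int
  | [], _ => 0
  | r :: rest, m =>
    (if PySem.List.pyGetD r 0 0 + PySem.List.pyGetD r 1 0 > ta + tb ∧ m ≤ PySem.List.pyGetD r 1 0 then 1 else 0)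
      + cntSpec ta tb rest (max m (PySem.List.pyGetD r 1 0))

lemma solLoopA_dom (ta tb : Int) (l : List (List Int)) (maxb count : Int)
    (h : ∃ r ∈ l, PySem.List.pyGetD r 0 0 > ta ∧ PySem.List.pyGetD r 1 0 > tb) :
    solLoopA ta tb l maxb count = -1 := by
  induction l generalizing maxb count with
  | nil => simp at h
  | cons r rest ih =>
    simp only [solLoopA]
    rcases h with ⟨x, hx, hdom⟩
    rcases List.mem_cons.mp hx with rfl | hx'
    · simp [hdom]
    · by_cases hd : PySem.List.pyGetD r 0 0 > ta ∧ PySem.List.pyGetD r 1 0 > tb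
      · simp [hd]
      · simp only [if_neg hd]
        split_ifs <;> exact ih _ _ ⟨x, hx', hdom⟩

lemma solLoopA_no_dom (ta tb : Int) (l : List (List Int)) (maxb count : Int)
    (h : ¬ ∃ r ∈ l, PySem.List.pyGetD r 0 0 > ta ∧ PySem.List.pyGetD r 1 0 > tb) :
    solLoopA ta tb l maxb count = count + cntSpec ta tb l maxb + 1 := by
  induction l generalizing maxb count with
  | nil => simp [solLoopA, cntSpec]
  | cons r rest ih =>
    have hhead : ¬ (PySem.List.pyGetD r 0 0 > ta ∧ PySem.List.pyGetD r 1 0 > tb) := by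
      intro hd; exact h ⟨r, List.mem_cons_self, hd⟩
    have htail : ¬ ∃ x ∈ rest, PySem.List.pyGetD x 0 0 > ta ∧ PySem.List.pyGetD x 1 0 > tb := by
      intro ⟨x, hx, hd⟩; exact h ⟨x, List.mem_cons_of_mem _ hx, hd⟩
    simp only [solLoopA, if_neg hhead]
    by_cases hm : maxb ≤ PySem.List.pyGetD r 1 0
    · have hmax : max maxb (PySem.List.pyGetD r 1 0) = PySem.List.pyGetD r 1 0 := max_eq_right hm
      rw [if_pos hm, ih _ _ htail]
      simp only [cntSpec, hmax]
      split_ifs with hs hc hc <;> omega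
    · have hmax : max maxb (PySem.List.pyGetD r 1 0) = maxb := by
        rcases max_choice maxb (PySem.List.pyGetD r 1 0) with h' | h'
        · exact h'
        · rw [h']; omega
      rw [if_neg hm, ih _ _ htail]
      simp only [cntSpec, hmax]
      split_ifs with hc <;> omega

lemma bfold (ta tb : Int) (s : List (List Int)) :
    ∀ (t p : List (List Int)) (acc : Int), s = p ++ t →
      (PySem.List.enumerate t (p.length : Int)).foldl (fun acc q =>
          let a := PySem.List.pyGetD q.2 0 0
          let b := PySem.List.pyGetD q.2 1 0
          if a + b > ta + tb ∧
              PySem.List.maxD ((-1) :: (PySem.List.slice s none (some q.1)).map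
                (fun r => PySem.List.pyGetD r 1 0)) (fun x => x) 0 ≤ b
          then acc + 1 else acc) acc
        = acc + cntSpec ta tb t ((p.map (fun r => PySem.List.pyGetD r 1 0)).foldl max (-1)) := by
  intro t
  induction t with
  | nil => intro p acc _; simp [PySem.List.enumerate_nil, cntSpec]
  | cons r rest ih =>
    intro p acc hs
    rw [PySem.List.enumerate_cons, List.foldl_cons]
    have hslice : PySem.List.slice s none (some (p.length : Int)) = p := by
      rw [PySem.List.slice_to_natCast, hs, List.take_left]
    have hmaxD : PySem.List.maxD ((-1) :: (p.map (fun r => PySem.List.pyGetD r 1 0)))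
        (fun x => x) 0 = (p.map (fun r => PySem.List.pyGetD r 1 0)).foldl max (-1) := by
      simp [PySem.List.maxD, PySem.List.max?_id_cons]
    have hp' : s = (p ++ [r]) ++ rest := by rw [hs, List.append_assoc]; rfl
    have hlen : ((p ++ [r]).length : Int) = (p.length : Int) + 1 := by
      simp [List.length_append]
    have hmax' : ((p ++ [r]).map (fun x => PySem.List.pyGetD x 1 0)).foldl max (-1)
        = max ((p.map (fun x => PySem.List.pyGetD x 1 0)).foldl max (-1)) (PySem.List.pyGetD r 1 0) := by
      simp [List.map_append, List.foldl_append]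
    have := ih (p ++ [r]) ((if PySem.List.pyGetD r 0 0 + PySem.List.pyGetD r 1 0 > ta + tb ∧
        (p.map (fun x => PySem.List.pyGetD x 1 0)).foldl max (-1) ≤ PySem.List.pyGetD r 1 0
      then acc + 1 else acc)) hp'
    rw [hlen, hmax'] at this
    dsimp only
    rw [hslice, hmaxD, this]
    simp only [cntSpec]
    split_ifs <;> omega

-- ===== VERDICT (by name: the statement is the Claim_ definition above) =====
theorem solution_spec : Claim_equal_solution := by
  intro scores _ _
  unfold Spec_solution solution solution_alt
  set ta := PySem.List.pyGetD (PySem.List.pyGetD scores 0 []) 0 0 with hta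
  set tb := PySem.List.pyGetD (PySem.List.pyGetD scores 0 []) 1 0 with htb
  set s := PySem.List.sorted2 scores (fun x => -(PySem.List.pyGetD x 0 0)) (fun x => PySem.List.pyGetD x 1 0) with hsdef
  by_cases hdom : ∃ r ∈ s, PySem.List.pyGetD r 0 0 > ta ∧ PySem.List.pyGetD r 1 0 > tb
  · have hany : s.any (fun r => decide (PySem.List.pyGetD r 0 0 > ta) && decide (PySem.List.pyGetD r 1 0 > tb)) = true := by
      simp only [List.any_eq_true, Bool.and_eq_true, decide_eq_true_eq]
      exact hdom
    rw [if_pos hany, solLoopA_dom ta tb s (-1) 0 hdom]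
  · have hany : ¬ s.any (fun r => decide (PySem.List.pyGetD r 0 0 > ta) && decide (PySem.List.pyGetD r 1 0 > tb)) = true := by
      simp only [List.any_eq_true, Bool.and_eq_true, decide_eq_true_eq]
      exact hdom
    rw [if_neg hany, solLoopA_no_dom ta tb s (-1) 0 hdom]
    have hb := bfold ta tb s s [] 0 rfl
    simp only [List.length_nil, Int.natCast_zero, List.map_nil, List.foldl_nil] at hb
    rw [hb]
    omega
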